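-- pv_equiv track=rewrite | github.com/nik-weter/pybursa | 3/task3.py | revers_phrase
-- ===== SOURCE A (Python) =====
-- def revers_word(word):
--     return word[::-1]
--
-- def revers_phrase(phrase):
--     phrase = phrase.strip()
--     phrase = phrase.replace(".", "")
--     phrase = phrase.split()
--     phrase.reverse()
--     for j in range(len(phrase)):
--         phrase[j] = revers_word(phrase[j])
--     res = " ".join(phrase)
--     return res
-- ===== SOURCE B (Python) =====
-- def revers_phrase(phrase):
--     normalized = " ".join(phrase.strip().replace(".", "").split())
--     return normalized[::-1]
-- ===== Notes on version B (the rewrite author's own statement) =====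
-- stated objective: simpler
-- what changed: B normalizes the phrase to single-space-separated words exactly as A does, then reverses the whole normalized string once, instead of reversing the word list and then reversing each word in an index loop.
import Mathlib
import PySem

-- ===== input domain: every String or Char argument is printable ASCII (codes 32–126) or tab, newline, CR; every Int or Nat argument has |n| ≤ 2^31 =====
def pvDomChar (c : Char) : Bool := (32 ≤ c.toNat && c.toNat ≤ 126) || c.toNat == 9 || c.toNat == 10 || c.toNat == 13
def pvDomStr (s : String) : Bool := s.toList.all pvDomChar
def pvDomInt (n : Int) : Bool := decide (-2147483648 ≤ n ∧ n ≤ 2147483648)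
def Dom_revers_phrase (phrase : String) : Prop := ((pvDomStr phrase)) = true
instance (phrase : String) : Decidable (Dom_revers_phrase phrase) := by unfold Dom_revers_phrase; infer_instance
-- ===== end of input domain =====

-- B replaces A's two-level reversal (reverse the word list, then reverse each word)
-- by one whole-string reversal of the single-space-normalized phrase (objective: simpler).

-- ===== PORT A =====
-- word[::-1]; slice? is none only for step = 0, so the getD default is unreachable here
def revers_word (word : String) : String :=
  (PySem.Str.slice? word none none (-1)).getD ""

def revers_phrase (phrase : String) : String :=
  let p1 := PySem.Str.strip phrase
  let p2 := PySem.Str.replace p1 "." ""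
  let ws := PySem.Str.split₀ p2
  let ws := ws.reverse
  -- for j in range(len(phrase)): phrase[j] = revers_word(phrase[j])
  let ws := ws.map revers_word
  PySem.Str.join " " ws

-- ===== PORT B =====
def revers_phrase_alt (phrase : String) : String :=
  let normalized :=
    PySem.Str.join " "
      (PySem.Str.split₀ (PySem.Str.replace (PySem.Str.strip phrase) "." ""))
  -- normalized[::-1]; slice? is none only for step = 0, unreachable here
  (PySem.Str.slice? normalized none none (-1)).getD ""

-- ===== PRECONDITION & SPEC =====
def Spec_revers_phrase (phrase : String) (out : String) : Prop := out = revers_phrase_alt phrase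
instance (phrase : String) (out : String) : Decidable (Spec_revers_phrase phrase out) := by unfold Spec_revers_phrase; infer_instance

-- ===== CLAIM (what is proved, stated in full; the proofs are below) =====
def Claim_equal_revers_phrase : Prop := ∀ (phrase : String), Dom_revers_phrase phrase → Spec_revers_phrase phrase (revers_phrase phrase)

-- ===== LEMMAS AND PROOFS =====

theorem join_append_singleton (sep y : List Char) (xs : List (List Char)) (h : xs ≠ []) :
    PySem.Chars.join sep (xs ++ [y]) = PySem.Chars.join sep xs ++ sep ++ y := by
  induction xs with
  | nil => simp at h
  | cons x rest ih =>
    cases rest with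
    | nil => simp [PySem.Chars.join_cons_cons, PySem.Chars.join_singleton]
    | cons q r =>
      have h2 := ih (by simp)
      simp only [List.cons_append] at h2 ⊢
      rw [PySem.Chars.join_cons_cons, PySem.Chars.join_cons_cons, h2]
      simp

-- joining with a single space after reversing the word list and each word
-- is reversing the joined string
theorem join_rev (ws : List (List Char)) :
    PySem.Chars.join [' '] (ws.reverse.map List.reverse) =
      (PySem.Chars.join [' '] ws).reverse := by
  induction ws with
  | nil => simp [PySem.Chars.join_nil]
  | cons w rest ih =>
    cases rest with
    | nil => simp [PySem.Chars.join_singleton]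
    | cons q r =>
      rw [PySem.Chars.join_cons_cons]
      simp only [List.reverse_cons, List.map_append, List.map_cons, List.map_nil] at ih ⊢
      rw [join_append_singleton _ _ _ (by simp), ih]
      simp

theorem revers_word_eq (w : String) :
    revers_word w = String.ofList w.toList.reverse := by
  simp [revers_word, PySem.Str.slice?_none_none_neg_one]

-- the whole identity, lifted to String words
theorem join_rev_str (ws : List String) :
    PySem.Str.join " " (ws.reverse.map revers_word) =
      String.ofList (PySem.Str.join " " ws).toList.reverse := by
  rw [← String.toList_inj]
  simp only [PySem.Str.toList_join, String.toList_ofList]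
  have h : List.map String.toList (ws.reverse.map revers_word) =
      (List.map String.toList ws).reverse.map List.reverse := by
    simp [List.map_map, Function.comp, revers_word_eq]
  rw [h]
  have hs : (" " : String).toList = [' '] := rfl
  rw [hs]
  exact join_rev (List.map String.toList ws)

-- ===== VERDICT (by name: the statement is the Claim_ definition above) =====
theorem revers_phrase_spec : Claim_equal_revers_phrase := by
  intro phrase _
  show revers_phrase phrase = revers_phrase_alt phrase
  unfold revers_phrase revers_phrase_alt
  show PySem.Str.join " "
      ((PySem.Str.split₀ (PySem.Str.replace (PySem.Str.strip phrase) "." "")).reverse.map revers_word) =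
    (PySem.Str.slice?
      (PySem.Str.join " " (PySem.Str.split₀ (PySem.Str.replace (PySem.Str.strip phrase) "." "")))
      none none (-1)).getD ""
  rw [PySem.Str.slice?_none_none_neg_one]
  simp only [Option.getD_some]
  exact join_rev_str _
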